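-- pv_equiv track=rewrite | github.com/salspaugh/queryanalysis | queryanalysis/lsi/experiments/onefieldfun/extraction.py | space_around_nonletters
-- ===== SOURCE A (Python) =====
-- import string
--
-- def space_around_nonletters(old):
--     new = ""
--     for i in range(len(old)):
--         if i == 0:
--             new = ''.join([new, old[i]])
--         elif (old[i] in string.ascii_letters and not old[i-1] in string.ascii_letters) or \
--             (not old[i] in string.ascii_letters and old[i-1] in string.ascii_letters):
--             new = ' '.join([new, old[i]])
--         else:
--             new = ''.join([new, old[i]])
--     return new
-- ===== SOURCE B (Python) =====
-- import string
--
-- def space_around_nonletters(old):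
--     # run-based: scan out maximal runs of same letterness, then join with spaces
--     runs = []
--     i = 0
--     n = len(old)
--     while i < n:
--         k = old[i] in string.ascii_letters
--         j = i + 1
--         while j < n and (old[j] in string.ascii_letters) == k:
--             j += 1
--         runs.append(old[i:j])
--         i = j
--     return ' '.join(runs)
-- ===== Notes on version B (the rewrite author's own statement) =====
-- stated objective: faster
-- what changed: Replaced the per-index loop with pairwise neighbour comparisons and repeated string concatenation by a run-based scan that extracts maximal runs of same letterness and joins the runs with a single-space separator.
import Mathlib
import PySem

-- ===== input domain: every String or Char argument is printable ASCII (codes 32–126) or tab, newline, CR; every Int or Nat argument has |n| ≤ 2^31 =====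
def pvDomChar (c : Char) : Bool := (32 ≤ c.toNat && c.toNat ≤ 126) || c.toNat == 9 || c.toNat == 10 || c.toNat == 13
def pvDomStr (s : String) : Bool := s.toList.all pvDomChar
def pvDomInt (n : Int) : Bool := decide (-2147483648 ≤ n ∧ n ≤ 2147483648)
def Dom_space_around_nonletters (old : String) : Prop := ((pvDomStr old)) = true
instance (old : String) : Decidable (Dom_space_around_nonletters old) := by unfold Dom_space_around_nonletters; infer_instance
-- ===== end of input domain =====

-- B replaces A's per-index loop with neighbour comparisons and repeated concatenation by a
-- run-based scan (maximal runs of same letterness joined with single spaces); return value only.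

-- shared letterness predicate: membership in string.ascii_letters (exact for all Char)
def isAsciiLetter (c : Char) : Bool :=
  ('a' ≤ c && c ≤ 'z') || ('A' ≤ c && c ≤ 'Z')

-- ===== PORT A =====
-- one iteration of A's `for i in range(len(old))` body; indices are in range, so getD is exact for old[i]
def stepA (cs : List Char) (new : List Char) (i : Nat) : List Char :=
  if i = 0 then new ++ [cs.getD i ' ']
  else if (isAsciiLetter (cs.getD i ' ') && !isAsciiLetter (cs.getD (i-1) ' ')) ||
          (!isAsciiLetter (cs.getD i ' ') && isAsciiLetter (cs.getD (i-1) ' ')) then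
    new ++ [' ', cs.getD i ' ']
  else new ++ [cs.getD i ' ']

def space_around_nonletters (old : String) : String :=
  String.mk ((List.range old.toList.length).foldl (stepA old.toList) [])

-- ===== PORT B =====
-- inner while-loop of Source B: the maximal prefix of letterness k, and the rest
def takeRun (k : Bool) : List Char → List Char × List Char
  | [] => ([], [])
  | c :: cs =>
    if isAsciiLetter c = k then
      let p := takeRun k cs
      (c :: p.1, p.2)
    else ([], c :: cs)

theorem takeRun_snd_length (k : Bool) (cs : List Char) : (takeRun k cs).2.length ≤ cs.length := by
  induction cs with
  | nil => simp [takeRun]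
  | cons c cs ih =>
    simp only [takeRun]
    split <;> simp <;> omega

-- outer while-loop of Source B: the list of maximal same-letterness runs
def runsOf : List Char → List (List Char)
  | [] => []
  | c :: cs =>
    (c :: (takeRun (isAsciiLetter c) cs).1) :: runsOf (takeRun (isAsciiLetter c) cs).2
termination_by cs => cs.length
decreasing_by
  have := takeRun_snd_length (isAsciiLetter c) cs
  simp; omega

-- ' '.join
def joinRuns : List (List Char) → List Char
  | [] => []
  | [r] => r
  | r :: rs => r ++ ' ' :: joinRuns rs

def space_around_nonletters_alt (old : String) : String :=
  String.mk (joinRuns (runsOf old.toList))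

-- ===== PRECONDITION & SPEC =====
def Spec_space_around_nonletters (old : String) (out : String) : Prop := out = space_around_nonletters_alt old
instance (old : String) (out : String) : Decidable (Spec_space_around_nonletters old out) := by unfold Spec_space_around_nonletters; infer_instance

-- ===== CLAIM =====
def Claim_equal_space_around_nonletters : Prop := ∀ (old : String), Dom_space_around_nonletters old → Spec_space_around_nonletters old (space_around_nonletters old)

-- ===== LEMMAS AND PROOFS =====

-- a neighbour-comparison normal form both programs reduce to
def aChar (p c : Char) : List Char :=
  if isAsciiLetter c ≠ isAsciiLetter p then [' ', c] else [c]

def goA : Char → List Char → List Char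
  | _, [] => []
  | p, c :: cs => aChar p c ++ goA c cs

def aList : List Char → List Char
  | [] => []
  | c :: cs => c :: goA c cs

theorem goA_append (p : Char) (ds : List Char) (c : Char) :
    goA p (ds ++ [c]) = goA p ds ++ aChar ((p :: ds).getLast (by simp)) c := by
  induction ds generalizing p with
  | nil => simp [goA]
  | cons d ds ih => simp [goA, ih d, List.getLast_cons]

theorem aList_append (d : Char) (ds : List Char) (c : Char) :
    aList ((d :: ds) ++ [c]) = aList (d :: ds) ++ aChar ((d :: ds).getLast (by simp)) c := by
  simp [aList, goA_append]

theorem cond_eq (x y : Bool) :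
    ((x && !y) || (!x && y)) = decide (x ≠ y) := by cases x <;> cases y <;> decide

theorem foldl_stepA_eq_aList (cs : List Char) :
    (List.range cs.length).foldl (stepA cs) [] = aList cs := by
  induction cs using List.reverseRecOn with
  | nil => simp [aList]
  | append_singleton ds c ih =>
    have hcongr : (List.range ds.length).foldl (stepA (ds ++ [c])) [] =
        (List.range ds.length).foldl (stepA ds) [] := by
      apply PySem.List.foldl_congr_mem
      intro acc i hi
      have hi' : i < ds.length := by simpa using hi
      unfold stepA
      have h1 : (ds ++ [c]).getD i ' ' = ds.getD i ' ' := by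
        exact List.getD_append ds [c] ' ' i hi'
      have h2 : (ds ++ [c]).getD (i - 1) ' ' = ds.getD (i - 1) ' ' := by
        have h' : i - 1 < ds.length := by omega
        exact List.getD_append ds [c] ' ' (i-1) h'
      rw [h1, h2]
    have hlen : (ds ++ [c]).length = ds.length + 1 := by simp
    rw [hlen, List.range_succ, List.foldl_append, hcongr, ih]
    cases ds with
    | nil => simp [stepA, aList, goA]
    | cons d ds' =>
      rw [aList_append]
      unfold stepA
      have hne : d :: ds' ≠ ([] : List Char) := by simp
      have hgetc : (d :: ds' ++ [c]).getD (d :: ds').length ' ' = c := by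
        simp [List.getD]
      have hgetp : (d :: ds' ++ [c]).getD ((d :: ds').length - 1) ' ' =
          (d :: ds').getLast hne := by
        have hlt : (d :: ds').length - 1 < (d :: ds').length := by simp
        rw [List.getD_append (d :: ds') [c] ' ' _ hlt, List.getD_eq_getElem _ _ hlt,
          List.getLast_eq_getElem]
      have h0 : (d :: ds').length ≠ 0 := by simp
      have hlt : ds'.length < (d :: ds').length := by simp
      have hmid : (d :: (ds' ++ [c]))[ds'.length]'(by simp only [List.length_cons, List.length_append, List.length_nil]; omega) = (d :: ds').getLast hne := by
        rw [List.getLast_eq_getElem]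
        exact List.getElem_append_left hlt
      simp only [if_neg h0, hgetc, hgetp, cond_eq]
      unfold aChar
      split
      · rename_i h; simp [h, hmid]
      · rename_i h; simp [h, hmid]

theorem joinRuns_cons_cons (r : List Char) (s : List Char) (rs : List (List Char)) :
    joinRuns (r :: s :: rs) = r ++ ' ' :: joinRuns (s :: rs) := by
  simp [joinRuns]

theorem run_join (cs : List Char) (p : Char) :
    p :: goA p cs =
      joinRuns ((p :: (takeRun (isAsciiLetter p) cs).1) ::
        runsOf (takeRun (isAsciiLetter p) cs).2) := by
  induction cs generalizing p with
  | nil => simp [takeRun, runsOf, joinRuns, goA]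
  | cons c cs ih =>
    by_cases h : isAsciiLetter c = isAsciiLetter p
    · have h1 : takeRun (isAsciiLetter p) (c :: cs) =
          (c :: (takeRun (isAsciiLetter p) cs).1, (takeRun (isAsciiLetter p) cs).2) := by
        simp [takeRun, h]
      rw [h1]
      have := ih c
      rw [h] at this
      have hjoin : ∀ (r : List Char) (rs : List (List Char)),
          joinRuns ((p :: c :: r) :: rs) = p :: joinRuns ((c :: r) :: rs) := by
        intro r rs; cases rs <;> simp [joinRuns]
      rw [hjoin, ← this]
      simp [goA, aChar, h]
    · have h1 : takeRun (isAsciiLetter p) (c :: cs) = ([], c :: cs) := by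
        simp [takeRun]
        intro hc; exact absurd hc h
      rw [h1]
      have h2 : runsOf (c :: cs) =
          (c :: (takeRun (isAsciiLetter c) cs).1) ::
            runsOf (takeRun (isAsciiLetter c) cs).2 := by
        simp [runsOf]
      rw [h2, joinRuns_cons_cons, ← ih c]
      simp [goA, aChar, h]

theorem joinRuns_runsOf_eq_aList (cs : List Char) : joinRuns (runsOf cs) = aList cs := by
  cases cs with
  | nil => simp [runsOf, joinRuns, aList]
  | cons c cs =>
    have h : runsOf (c :: cs) =
        (c :: (takeRun (isAsciiLetter c) cs).1) ::
          runsOf (takeRun (isAsciiLetter c) cs).2 := by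
      simp [runsOf]
    rw [h, ← run_join cs c]
    simp [aList]

-- ===== VERDICT =====
theorem space_around_nonletters_spec : Claim_equal_space_around_nonletters := by
  intro old _
  unfold Spec_space_around_nonletters space_around_nonletters space_around_nonletters_alt
  rw [foldl_stepA_eq_aList, joinRuns_runsOf_eq_aList]
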